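-- pv_equiv track=rewrite | github.com/scut-jol/Aspirat | predict.py | sequence_to_intervals
-- ===== SOURCE A (Python) =====
-- def sequence_to_intervals(sequence):
--     intervals = []
--     start = None
--     duration = 200  # 每个数值的间隔是200ms
--
--     for index, value in enumerate(sequence):
--         if value == 1 and start is None:
--             start = index * duration
--         elif value == 0 and start is not None:
--             end = index * duration
--             intervals.append((start, end))
--             start = None
--
--     # 如果序列在最后一个位置结束是1，需要处理最后的区间
--     if start is not None:
--         end = len(sequence) * duration
--         intervals.append((start, end))
--
--     return intervals
-- ===== SOURCE B (Python) =====
-- def sequence_to_intervals(sequence):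
--     # Pass 1: forward-fill the active state (1 -> on, 0 -> off, anything else carries).
--     active = []
--     state = False
--     for v in sequence:
--         if v == 1:
--             state = True
--         elif v == 0:
--             state = False
--         active.append(state)
--     # Pass 2: extract maximal runs of consecutive active positions.
--     intervals = []
--     n = len(active)
--     i = 0
--     while i < n:
--         if not active[i]:
--             i += 1
--         else:
--             j = i + 1
--             while j < n and active[j]:
--                 j += 1
--             intervals.append((i * 200, j * 200))
--             i = j
--     return intervals
-- ===== Notes on version B (the rewrite author's own statement) =====
-- stated objective: alternative
-- what changed: Replaces A's single stateful scan (optional open-interval start carried through the loop, with a post-loop fixup for an unterminated interval) by two passes: first forward-fill an explicit boolean active-state list, then extract maximal runs of consecutive active positions with an index scan.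
import Mathlib
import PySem

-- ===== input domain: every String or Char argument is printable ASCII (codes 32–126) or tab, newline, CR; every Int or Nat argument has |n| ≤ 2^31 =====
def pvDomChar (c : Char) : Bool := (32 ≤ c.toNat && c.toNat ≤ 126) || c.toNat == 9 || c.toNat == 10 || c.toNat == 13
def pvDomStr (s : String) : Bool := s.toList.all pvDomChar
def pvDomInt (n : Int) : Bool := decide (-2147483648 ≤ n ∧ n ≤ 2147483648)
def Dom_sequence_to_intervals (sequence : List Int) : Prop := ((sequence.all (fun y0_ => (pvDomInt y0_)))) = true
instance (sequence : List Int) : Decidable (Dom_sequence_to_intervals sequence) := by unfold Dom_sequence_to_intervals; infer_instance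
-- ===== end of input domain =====

-- B replaces A's single stateful scan by two passes (forward-fill an explicit
-- active-state list, then extract maximal runs); same O(n) cost ("alternative").

-- ===== PORT A =====
-- the for-loop over enumerate(sequence): state = (accumulated intervals, optional open start)
def pvALoop (idx : Int) (start : Option Int) (acc : List (Int × Int)) :
    List Int → List (Int × Int) × Option Int
  | [] => (acc, start)
  | v :: rest =>
    match start with
    | none =>
      if v = 1 then pvALoop (idx + 1) (some (idx * 200)) acc rest
      else pvALoop (idx + 1) none acc rest
    | some s =>
      if v = 0 then pvALoop (idx + 1) none (acc ++ [(s, idx * 200)]) rest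
      else pvALoop (idx + 1) (some s) acc rest

def sequence_to_intervals (sequence : List Int) : List (Int × Int) :=
  let r := pvALoop 0 none [] sequence
  match r.2 with
  | some s => r.1 ++ [(s, (sequence.length : Int) * 200)]
  | none => r.1

-- ===== PORT B =====
-- pass 1: forward-fill the active state (1 -> true, 0 -> false, else carry)
def pvFill (state : Bool) : List Int → List Bool
  | [] => []
  | v :: rest =>
    let s := if v = 1 then true else if v = 0 then false else state
    s :: pvFill s rest

-- pass 2: the two while loops — outer scan (pvRuns) and inner run scan (pvRun)
mutual
def pvRuns : Int → List Bool → List (Int × Int)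
  | _, [] => []
  | i, false :: rest => pvRuns (i + 1) rest
  | i, true :: rest => pvRun i (i + 1) rest

def pvRun : Int → Int → List Bool → List (Int × Int)
  | i, j, [] => [(i * 200, j * 200)]
  | i, j, true :: rest => pvRun i (j + 1) rest
  | i, j, false :: rest => (i * 200, j * 200) :: pvRuns (j + 1) rest
end

def sequence_to_intervals_alt (sequence : List Int) : List (Int × Int) :=
  pvRuns 0 (pvFill false sequence)

-- ===== PRECONDITION & SPEC =====
def Spec_sequence_to_intervals (sequence : List Int) (out : List (Int × Int)) : Prop := out = sequence_to_intervals_alt sequence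
instance (sequence : List Int) (out : List (Int × Int)) : Decidable (Spec_sequence_to_intervals sequence out) := by unfold Spec_sequence_to_intervals; infer_instance

-- ===== CLAIM (what is proved, stated in full; the proofs are below) =====
def Claim_equal_sequence_to_intervals : Prop := ∀ (sequence : List Int), Dom_sequence_to_intervals sequence → Spec_sequence_to_intervals sequence (sequence_to_intervals sequence)

-- ===== LEMMAS AND PROOFS =====

-- "finish" A's loop result at final index n (the post-loop unterminated-interval fixup)
def pvFinish (r : List (Int × Int) × Option Int) (n : Int) : List (Int × Int) :=
  match r.2 with
  | some s => r.1 ++ [(s, n * 200)]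
  | none => r.1

-- the joint loop invariant relating A's scan to B's two passes, for both states
theorem pvLen (v : Int) (rest : List Int) (idx : Int) :
    idx + ((v :: rest).length : Int) = (idx + 1) + (rest.length : Int) := by
  push_cast [List.length_cons]; ring

theorem pvInv (seq : List Int) :
    (∀ (idx : Int) (acc : List (Int × Int)),
        pvFinish (pvALoop idx none acc seq) (idx + seq.length) =
          acc ++ pvRuns idx (pvFill false seq)) ∧
    (∀ (idx : Int) (acc : List (Int × Int)) (s : Int),
        pvFinish (pvALoop idx (some (s * 200)) acc seq) (idx + seq.length) =
          acc ++ pvRun s idx (pvFill true seq)) := by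
  induction seq with
  | nil =>
    constructor <;> intros <;> simp [pvALoop, pvFill, pvRuns, pvRun, pvFinish]
  | cons v rest ih =>
    obtain ⟨ihn, ihs⟩ := ih
    constructor
    · intro idx acc
      rw [pvLen]
      simp only [pvALoop, pvFill]
      split_ifs with h1 h0
      · simp only [pvRuns]
        exact ihs (idx + 1) acc idx
      · simp only [pvRuns]
        exact ihn (idx + 1) acc
      · simp only [pvRuns]
        exact ihn (idx + 1) acc
    · intro idx acc s
      rw [pvLen]
      simp only [pvALoop, pvFill]
      split_ifs with h0 h1
      · omega
      · simp only [pvRun]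
        rw [ihn (idx + 1) (acc ++ [(s * 200, idx * 200)]), List.append_assoc]
        rfl
      · simp only [pvRun]
        exact ihs (idx + 1) acc s
      · simp only [pvRun]
        exact ihs (idx + 1) acc s

-- ===== VERDICT (by name: the statement is the Claim_ definition above) =====
theorem sequence_to_intervals_spec : Claim_equal_sequence_to_intervals := by
  intro seq _
  unfold Spec_sequence_to_intervals sequence_to_intervals sequence_to_intervals_alt
  have h := (pvInv seq).1 0 []
  simpa [pvFinish] using h
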